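-- pv_equiv track=rewrite | github.com/DERMOUCHERYAD/ColorWise | model.py | deux_col
-- ===== SOURCE A (Python) =====
-- def deux_col(graphe):
--     """
--     Vérifie si un graphe est 2-coloriable.
--     Si oui, retourne le coloriage (0, 1).
--     Si non, retourne None.
--     """
--     n = len(graphe)
--     couleurs = [-1] * n
--
--     def dfs(u, c):
--         couleurs[u] = c
--         for v in range(n):
--             if graphe[u][v]:
--                 if couleurs[v] == c:  # Conflit détecté
--                     return False
--                 if couleurs[v] == -1 and not dfs(v, 1 - c):  # Colorier avec l'autre couleur
--                     return False
--         return True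
--
--     for i in range(n):
--         if couleurs[i] == -1:  # Si un sommet n'est pas encore colorié
--             if not dfs(i, 0):
--                 return False, None  # Pas 2-coloriable
--     return True, couleurs  # 2-coloriable et étiquetage
-- ===== SOURCE B (Python) =====
-- def deux_col(graphe):
--     """
--     Vérifie si un graphe est 2-coloriable.
--     Si oui, retourne le coloriage (0, 1).
--     Si non, retourne None.
--     """
--     n = len(graphe)
--     couleurs = [-1] * n
--     i = 0
--     while i < n:
--         if couleurs[i] < 0:
--             couleurs[i] = 0
--             pile = [(i, 0)]  # frames (sommet, prochain voisin); couleur lue dans couleurs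
--             while pile:
--                 u, v = pile.pop()
--                 if v < n:
--                     pile.append((u, v + 1))
--                     if graphe[u][v]:
--                         cv = couleurs[v]
--                         if cv < 0:
--                             couleurs[v] = 1 - couleurs[u]
--                             pile.append((v, 0))
--                         elif cv == couleurs[u]:
--                             return False, None
--         i += 1
--     return True, couleurs
-- ===== Notes on version B (the rewrite author's own statement) =====
-- stated objective: alternative
-- what changed: A's recursive nested dfs closure carrying the colour as an argument is replaced by a flat, tail-iterative worklist loop: a pop/re-push stack of bare (vertex, next-neighbour-index) pairs, the colour re-read from the couleurs array instead of being threaded through calls, the outer for-range replaced by a while counter; same edge-visit order, no recursion-depth limit.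
-- outside the precondition, e.g. on deux_col([[0, 1, 0], [1, 1], [0, 0, 0]]): A returns (False, None), B returns (False, None)
import Mathlib
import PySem

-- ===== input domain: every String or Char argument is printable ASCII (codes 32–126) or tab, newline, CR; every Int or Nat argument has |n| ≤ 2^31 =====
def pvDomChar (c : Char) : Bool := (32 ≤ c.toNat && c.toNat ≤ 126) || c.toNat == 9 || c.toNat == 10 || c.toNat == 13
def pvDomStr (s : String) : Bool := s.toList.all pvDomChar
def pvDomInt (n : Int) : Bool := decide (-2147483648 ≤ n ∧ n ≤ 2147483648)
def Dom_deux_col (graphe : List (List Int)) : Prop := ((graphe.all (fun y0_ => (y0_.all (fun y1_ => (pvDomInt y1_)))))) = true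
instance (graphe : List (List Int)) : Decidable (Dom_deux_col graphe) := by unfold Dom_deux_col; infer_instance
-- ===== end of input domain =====

-- B replaces A's recursive nested dfs (colour threaded as an argument) by a flat
-- tail-iterative worklist of (vertex, next-neighbour) pairs, the colour re-read from the
-- couleurs array; same edge-visit order.  Objective: alternative decomposition, same cost.

-- ===== PORT A =====
-- graphe[u][v] for 0 ≤ u,v < n; wherever the Python reads an existing entry this returns
-- it; the default 0 stands for entries whose read raises IndexError in Python (outside Pre_).
def pvEdge (g : List (List Int)) (u v : Nat) : Int := (g.getD u []).getD v 0

-- the body of A's `dfs(u, c)` after `couleurs[u] = c` (callers perform the set), looping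
-- over the remaining neighbour indices vs; `none` = False (conflict).  `fuel` only makes
-- the recursion total: it is decremented exactly at each nested dfs call, and since each
-- nested call colours a vertex that was -1, the initial fuel n is never exhausted.
def pvLoopA (g : List (List Int)) (n : Nat) (fuel : Nat) (cs : List Int) (u : Nat) (c : Int)
    (vs : List Nat) : Option (List Int) :=
  match vs with
  | [] => some cs
  | v :: vs' =>
    if pvEdge g u v ≠ 0 then
      if cs.getD v 0 = c then none
      else if cs.getD v 0 = -1 then
        if fuel = 0 then none
        else
          match pvLoopA g n (fuel - 1) (cs.set v (1 - c)) v (1 - c) (List.range n) with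
          | none => none
          | some cs2 => pvLoopA g n fuel cs2 u c vs'
      else pvLoopA g n fuel cs u c vs'
    else pvLoopA g n fuel cs u c vs'
termination_by (fuel, vs.length)
decreasing_by
  all_goals first
    | exact Prod.Lex.left _ _ (by omega)
    | exact Prod.Lex.right _ (by simp; try omega)

-- A's outer `for i in range(n)` loop
def pvOuterA (g : List (List Int)) (n : Nat) (cs : List Int) (is_ : List Nat) :
    Bool × Option (List Int) :=
  match is_ with
  | [] => (true, some cs)
  | i :: is' =>
    if cs.getD i 0 = -1 then
      match pvLoopA g n n (cs.set i 0) i 0 (List.range n) with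
      | none => (false, none)
      | some cs' => pvOuterA g n cs' is'
    else pvOuterA g n cs is'

def deux_col (graphe : List (List Int)) : Bool × Option (List Int) :=
  pvOuterA graphe graphe.length (List.replicate graphe.length (-1)) (List.range graphe.length)

-- ===== PORT B =====
-- B's inner `while pile:` loop: pop a bare frame (p, q) = (vertex, next neighbour index),
-- re-push the advanced frame, read the vertex's colour from couleurs; `gas` only makes the
-- loop total (decremented exactly when a -1 vertex gets coloured, so taille gas never runs out).
def pvStepB (graphe : List (List Int)) (taille : Nat) (gas : Nat) (couleurs : List Int)
    (pile : List (Nat × Nat)) : Option (List Int) :=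
  match pile with
  | [] => some couleurs
  | (p, q) :: tl =>
    if q < taille then
      if (graphe.getD p []).getD q 0 ≠ 0 then
        let cv := couleurs.getD q 0
        if cv < 0 then
          if gas = 0 then none
          else
            pvStepB graphe taille (gas - 1) (couleurs.set q (1 - couleurs.getD p 0))
              ((q, 0) :: (p, q + 1) :: tl)
        else if cv = couleurs.getD p 0 then none
        else pvStepB graphe taille gas couleurs ((p, q + 1) :: tl)
      else pvStepB graphe taille gas couleurs ((p, q + 1) :: tl)
    else pvStepB graphe taille gas couleurs tl
termination_by (gas, pile.foldr (fun z s => taille - z.2 + 1 + s) 0)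
decreasing_by
  · exact Prod.Lex.left _ _ (by omega)
  · apply Prod.Lex.right; simp; try omega
  · apply Prod.Lex.right; simp; try omega
  · apply Prod.Lex.right; simp; try omega

-- B's outer `while i < taille:` counter loop
def pvSweepB (graphe : List (List Int)) (taille : Nat) (couleurs : List Int) (j : Nat) :
    Bool × Option (List Int) :=
  if _h : j < taille then
    if couleurs.getD j 0 < 0 then
      match pvStepB graphe taille taille (couleurs.set j 0) [(j, 0)] with
      | none => (false, none)
      | some col => pvSweepB graphe taille col (j + 1)
    else pvSweepB graphe taille couleurs (j + 1)
  else (true, some couleurs)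
termination_by taille - j

def deux_col_alt (graphe : List (List Int)) : Bool × Option (List Int) :=
  let taille := graphe.length
  pvSweepB graphe taille (List.replicate taille (-1)) 0

-- ===== PRECONDITION & SPEC =====
-- Pre_ admits matrices whose rows all have length ≥ n (A reads only graphe[u][v] with
-- v < n, so it never raises there) and, in addition, ragged matrices with a self-loop at
-- vertex 0 (A then returns (False, None) immediately, reading only graphe[0][0]).  It
-- excludes the remaining ragged matrices, on which A raises IndexError unless a colour
-- conflict happens to abort the scan before a short row is read (B returns the same
-- (False, None) on those).
def Pre_deux_col (graphe : List (List Int)) : Prop :=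
  (∀ row ∈ graphe, graphe.length ≤ row.length) ∨
    (0 < graphe.length ∧ 0 < (graphe.getD 0 []).length ∧ (graphe.getD 0 []).getD 0 0 ≠ 0)
instance (graphe : List (List Int)) : Decidable (Pre_deux_col graphe) := by
  unfold Pre_deux_col; infer_instance

def pvWitness_deux_col : List (List Int) := [[0, 1], [1, 0]]

def Spec_deux_col (graphe : List (List Int)) (out : Bool × Option (List Int)) : Prop := out = deux_col_alt graphe
instance (graphe : List (List Int)) (out : Bool × Option (List Int)) : Decidable (Spec_deux_col graphe out) := by unfold Spec_deux_col; infer_instance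

-- ===== CLAIM (what is proved, stated in full; the proofs are below) =====
def Claim_equal_deux_col : Prop := ∀ (graphe : List (List Int)), Dom_deux_col graphe → Pre_deux_col graphe → Spec_deux_col graphe (deux_col graphe)

-- ===== LEMMAS AND PROOFS =====

-- number of still-uncoloured vertices
def pvCnt (cs : List Int) : Nat := cs.count (-1)

-- every entry of couleurs is -1, 0 or 1
def pvVals (cs : List Int) : Prop := ∀ x ∈ cs, x = -1 ∨ x = 0 ∨ x = 1

-- stack invariant of B's machine: every frame's column bound holds and its vertex is coloured
def pvSinvB (n : Nat) (cs : List Int) (st : List (Nat × Nat)) : Prop :=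
  ∀ fr ∈ st, fr.2 ≤ n ∧ (cs.getD fr.1 0 = 0 ∨ cs.getD fr.1 0 = 1)

theorem pvCnt_le (cs : List Int) : pvCnt cs ≤ cs.length := List.count_le_length

theorem pvCnt_set : ∀ (cs : List Int) (v : Nat) (x : Int), v < cs.length →
    cs.getD v 0 = -1 → x ≠ -1 → pvCnt (cs.set v x) + 1 = pvCnt cs := by
  intro cs
  induction cs with
  | nil => intro v x hv; simp at hv
  | cons a t ih =>
    intro v x hv hold hx
    cases v with
    | zero =>
      simp only [List.getD_cons_zero] at hold
      simp [pvCnt, List.set_cons_zero, hold, hx]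
    | succ v =>
      simp only [List.getD_cons_succ] at hold
      simp only [List.length_cons, Nat.add_lt_add_iff_right] at hv
      have h := ih v x hv hold hx
      simp only [pvCnt, List.set_cons_succ, List.count_cons] at h ⊢
      omega

theorem pvCnt_pos : ∀ (cs : List Int) (v : Nat), v < cs.length →
    cs.getD v 0 = -1 → 1 ≤ pvCnt cs := by
  intro cs v hv hold
  have hmem : (-1 : Int) ∈ cs := by
    rw [List.getD_eq_getElem cs 0 hv] at hold
    exact hold ▸ List.getElem_mem hv
  exact List.count_pos_iff.mpr hmem

theorem pvGetD_set_ne (cs : List Int) (v j : Nat) (x : Int) (h : j ≠ v) :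
    (cs.set v x).getD j 0 = cs.getD j 0 := by
  simp [List.getD, (Ne.symm h : v ≠ j)]

theorem pvGetD_set_self (cs : List Int) (v : Nat) (x : Int) (h : v < cs.length) :
    (cs.set v x).getD v 0 = x := by
  simp [List.getD, h]

theorem pvVals_getD (cs : List Int) (v : Nat) (h : pvVals cs) :
    cs.getD v 0 = -1 ∨ cs.getD v 0 = 0 ∨ cs.getD v 0 = 1 := by
  by_cases hv : v < cs.length
  · rw [List.getD_eq_getElem cs 0 hv]
    exact h _ (List.getElem_mem hv)
  · rw [List.getD_eq_default cs 0 (by omega)]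
    exact Or.inr (Or.inl rfl)

theorem pvVals_set (cs : List Int) (v : Nat) (x : Int) (h : pvVals cs)
    (hx : x = 0 ∨ x = 1) : pvVals (cs.set v x) := by
  intro y hy
  rcases List.mem_or_eq_of_mem_set hy with h' | h'
  · exact h y h'
  · subst h'; rcases hx with h'' | h''
    · exact Or.inr (Or.inl h'')
    · exact Or.inr (Or.inr h'')

theorem pvLoopA_nil (g : List (List Int)) (n f : Nat) (cs : List Int) (u : Nat) (c : Int) :
    pvLoopA g n f cs u c [] = some cs := by
  rw [pvLoopA]

theorem pvLoopA_cons (g : List (List Int)) (n f : Nat) (cs : List Int) (u : Nat) (c : Int)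
    (v : Nat) (vs' : List Nat) :
    pvLoopA g n f cs u c (v :: vs') =
      (if pvEdge g u v ≠ 0 then
        if cs.getD v 0 = c then none
        else if cs.getD v 0 = -1 then
          if f = 0 then none
          else
            match pvLoopA g n (f - 1) (cs.set v (1 - c)) v (1 - c) (List.range n) with
            | none => none
            | some cs2 => pvLoopA g n f cs2 u c vs'
        else pvLoopA g n f cs u c vs'
      else pvLoopA g n f cs u c vs') := by
  rw [pvLoopA]

theorem pvStepB_nil (g : List (List Int)) (n f : Nat) (cs : List Int) :
    pvStepB g n f cs [] = some cs := by
  rw [pvStepB]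

theorem pvStepB_cons (g : List (List Int)) (n f : Nat) (cs : List Int) (u v : Nat)
    (rest : List (Nat × Nat)) :
    pvStepB g n f cs ((u, v) :: rest) =
      (if v < n then
        if (g.getD u []).getD v 0 ≠ 0 then
          if cs.getD v 0 < 0 then
            if f = 0 then none
            else pvStepB g n (f - 1) (cs.set v (1 - cs.getD u 0)) ((v, 0) :: (u, v + 1) :: rest)
          else if cs.getD v 0 = cs.getD u 0 then none
          else pvStepB g n f cs ((u, v + 1) :: rest)
        else pvStepB g n f cs ((u, v + 1) :: rest)
      else pvStepB g n f cs rest) := by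
  rw [pvStepB]

-- core facts about A's dfs loop: fuel-irrelevance (given fuel ≥ #uncoloured) and that the
-- resulting colouring preserves length, values, coloured entries, and #uncoloured
theorem pvLoopA_props : ∀ (k : Nat) (vs : List Nat) (g : List (List Int)) (n : Nat)
    (cs : List Int) (u : Nat) (c : Int) (f : Nat),
    cs.length = n → (∀ v ∈ vs, v < n) → (c = 0 ∨ c = 1) → pvVals cs → pvCnt cs ≤ k → k ≤ f →
    (∀ f', k ≤ f' → pvLoopA g n f cs u c vs = pvLoopA g n f' cs u c vs) ∧
    (∀ cs', pvLoopA g n f cs u c vs = some cs' →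
      cs'.length = n ∧ pvCnt cs' ≤ pvCnt cs ∧ pvVals cs' ∧
      ∀ j, cs.getD j 0 ≠ -1 → cs'.getD j 0 = cs.getD j 0) := by
  intro k
  induction k using Nat.strong_induction_on with
  | _ k ihk =>
  intro vs
  induction vs with
  | nil =>
    intro g n cs u c f hlen hvs hc hvals hcnt hkf
    constructor
    · intro f' _; rw [pvLoopA_nil, pvLoopA_nil]
    · intro cs' h; rw [pvLoopA_nil] at h
      cases h; exact ⟨hlen, le_refl _, hvals, fun j _ => rfl⟩
  | cons v vs' ihvs =>
    intro g n cs u c f hlen hvs hc hvals hcnt hkf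
    have hv : v < n := hvs v List.mem_cons_self
    have hvs' : ∀ w ∈ vs', w < n := fun w hw => hvs w (List.mem_cons_of_mem _ hw)
    by_cases he : pvEdge g u v ≠ 0
    · by_cases hcf : cs.getD v 0 = c
      · -- conflict: both sides are none
        constructor
        · intro f' _
          rw [pvLoopA_cons, pvLoopA_cons, if_pos he, if_pos he, if_pos hcf, if_pos hcf]
        · intro cs' h
          rw [pvLoopA_cons, if_pos he, if_pos hcf] at h
          cases h
      · by_cases hm1 : cs.getD v 0 = -1
        · -- uncoloured neighbour: colour it and recurse (A's nested dfs call)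
          have hk1 : 1 ≤ pvCnt cs := pvCnt_pos cs v (hlen ▸ hv) hm1
          have hx : (1 - c : Int) ≠ -1 := by rcases hc with h | h <;> simp [h]
          have hlen1 : (cs.set v (1 - c)).length = n := by
            rw [List.length_set]; exact hlen
          have hcnt1 : pvCnt (cs.set v (1 - c)) + 1 = pvCnt cs :=
            pvCnt_set cs v (1 - c) (hlen ▸ hv) hm1 hx
          have hc1 : (1 - c : Int) = 0 ∨ (1 - c : Int) = 1 := by
            rcases hc with h | h <;> simp [h]
          have hvals1 : pvVals (cs.set v (1 - c)) := pvVals_set cs v (1 - c) hvals hc1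
          have hmono1 : ∀ j, cs.getD j 0 ≠ -1 → (cs.set v (1 - c)).getD j 0 = cs.getD j 0 := by
            intro j hj
            exact pvGetD_set_ne cs v j (1 - c) (fun hjv => hj (hjv ▸ hm1))
          have hklt : k - 1 < k := by omega
          have hf0 : ¬ f = 0 := by omega
          obtain ⟨irr_in, res_in⟩ := ihk (k - 1) hklt (List.range n) g n (cs.set v (1 - c))
            v (1 - c) (f - 1) hlen1 (fun w hw => List.mem_range.mp hw) hc1 hvals1 (by omega)
            (by omega)
          cases hres : pvLoopA g n (f - 1) (cs.set v (1 - c)) v (1 - c) (List.range n) with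
          | none =>
            constructor
            · intro f' hf'
              have hf'0 : ¬ f' = 0 := by omega
              have hres' := (irr_in (f' - 1) (by omega)).symm.trans hres
              rw [pvLoopA_cons, pvLoopA_cons, if_pos he, if_pos he, if_neg hcf, if_neg hcf,
                if_pos hm1, if_pos hm1, if_neg hf0, if_neg hf'0]
              simp only [hres, hres']
            · intro cs' h
              rw [pvLoopA_cons, if_pos he, if_neg hcf, if_pos hm1, if_neg hf0] at h
              simp only [hres] at h
              cases h
          | some cs2 =>
            obtain ⟨hlen2, hcnt2, hvals2, hmono2⟩ := res_in cs2 hres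
            obtain ⟨irr_co, res_co⟩ := ihk (k - 1) hklt vs' g n cs2 u c f hlen2 hvs' hc hvals2
              (by omega) (by omega)
            constructor
            · intro f' hf'
              have hf'0 : ¬ f' = 0 := by omega
              have hres' := (irr_in (f' - 1) (by omega)).symm.trans hres
              rw [pvLoopA_cons, pvLoopA_cons, if_pos he, if_pos he, if_neg hcf, if_neg hcf,
                if_pos hm1, if_pos hm1, if_neg hf0, if_neg hf'0]
              simp only [hres, hres']
              exact irr_co f' (by omega)
            · intro cs' h
              rw [pvLoopA_cons, if_pos he, if_neg hcf, if_pos hm1, if_neg hf0] at h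
              simp only [hres] at h
              obtain ⟨hl, hc', hvl, hmn⟩ := res_co cs' h
              refine ⟨hl, by omega, hvl, ?_⟩
              intro j hj
              rw [hmn j (by rw [hmono2 j (by rw [hmono1 j hj]; exact hj),
                hmono1 j hj]; exact hj)]
              rw [hmono2 j (by rw [hmono1 j hj]; exact hj), hmono1 j hj]
        · -- neighbour already has the other colour: skip
          obtain ⟨irr, res⟩ := ihvs g n cs u c f hlen hvs' hc hvals hcnt hkf
          constructor
          · intro f' hf'
            rw [pvLoopA_cons, pvLoopA_cons, if_pos he, if_pos he, if_neg hcf, if_neg hcf,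
              if_neg hm1, if_neg hm1]
            exact irr f' hf'
          · intro cs' h
            rw [pvLoopA_cons, if_pos he, if_neg hcf, if_neg hm1] at h
            exact res cs' h
    · -- no edge: skip
      obtain ⟨irr, res⟩ := ihvs g n cs u c f hlen hvs' hc hvals hcnt hkf
      constructor
      · intro f' hf'
        rw [pvLoopA_cons, pvLoopA_cons, if_neg he, if_neg he]
        exact irr f' hf'
      · intro cs' h
        rw [pvLoopA_cons, if_neg he] at h
        exact res cs' h

-- the simulation: running B's machine on a stack whose top frame is (u, v) is A's dfs loop
-- from neighbour v with u's stored colour, followed by the machine on the rest of the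
-- stack; plus machine fuel-irrelevance and preservation facts
theorem pvStepB_props : ∀ (k m : Nat) (g : List (List Int)) (n : Nat)
    (st : List (Nat × Nat)) (cs : List Int),
    st.foldr (fun fr a => (n - fr.2) + 1 + a) 0 ≤ m →
    cs.length = n → pvSinvB n cs st → pvVals cs → pvCnt cs ≤ k →
    ((∀ f, k ≤ f → ∀ u v rest, st = (u, v) :: rest →
        pvStepB g n f cs st = (match pvLoopA g n f cs u (cs.getD u 0) (List.range' v (n - v)) with
          | none => none
          | some cs' => pvStepB g n f cs' rest)) ∧
     (∀ f f', k ≤ f → k ≤ f' → pvStepB g n f cs st = pvStepB g n f' cs st) ∧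
     (∀ f cs', k ≤ f → pvStepB g n f cs st = some cs' →
        cs'.length = n ∧ pvCnt cs' ≤ pvCnt cs ∧ pvVals cs' ∧
        ∀ j, cs.getD j 0 ≠ -1 → cs'.getD j 0 = cs.getD j 0)) := by
  intro k
  induction k using Nat.strong_induction_on with
  | _ k ihk =>
  intro m
  induction m using Nat.strong_induction_on with
  | _ m ihm =>
  intro g n st cs hm hlen hsinv hvals hcnt
  have hfcons : ∀ (a w : Nat) (r : List (Nat × Nat)),
      ((a, w) :: r).foldr (fun fr x => (n - fr.2) + 1 + x) 0
        = (n - w) + 1 + r.foldr (fun fr x => (n - fr.2) + 1 + x) 0 :=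
    fun _ _ _ => rfl
  have hrn : List.range' 0 (n - 0) = List.range n := by
    rw [Nat.sub_zero, List.range_eq_range']
  have hsim : ∀ f, k ≤ f → ∀ u v rest, st = (u, v) :: rest →
      pvStepB g n f cs st = (match pvLoopA g n f cs u (cs.getD u 0) (List.range' v (n - v)) with
        | none => none
        | some cs' => pvStepB g n f cs' rest) := by
    intro f hkf u v rest hst
    subst hst
    obtain ⟨hvle, hcu⟩ := hsinv (u, v) List.mem_cons_self
    have hsinv' : pvSinvB n cs rest := fun fr hfr => hsinv fr (List.mem_cons_of_mem _ hfr)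
    have hmrest : (n - v) + 1 + rest.foldr (fun fr x => (n - fr.2) + 1 + x) 0 ≤ m := by
      rw [hfcons u v rest] at hm; exact hm
    by_cases hvn' : v < n
    · have hnv : n - v = (n - v - 1) + 1 := by omega
      have hnv2 : n - (v + 1) = n - v - 1 := by omega
      rw [pvStepB_cons, if_pos hvn', hnv, List.range'_succ, pvLoopA_cons,
        show (g.getD u []).getD v 0 = pvEdge g u v from rfl]
      have hsinv2 : pvSinvB n cs ((u, v + 1) :: rest) := by
        intro fr hfr
        rcases List.mem_cons.mp hfr with h | h
        · subst h; exact ⟨by omega, hcu⟩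
        · exact hsinv' fr h
      have hm2 : ((u, v + 1) :: rest).foldr (fun fr x => (n - fr.2) + 1 + x) 0 ≤ m - 1 := by
        rw [hfcons u (v + 1) rest]; omega
      by_cases he : pvEdge g u v ≠ 0
      · by_cases hcf : cs.getD v 0 = cs.getD u 0
        · -- conflict: both sides are none
          have hnneg : ¬ cs.getD v 0 < 0 := by
            rw [hcf]; rcases hcu with h | h <;> rw [h] <;> norm_num
          rw [if_pos he, if_pos he, if_neg hnneg, if_pos hcf, if_pos hcf]
        · by_cases hm1 : cs.getD v 0 = -1
          · -- uncoloured neighbour: B pushes a frame where A recurses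
            have hneg : cs.getD v 0 < 0 := by rw [hm1]; norm_num
            have hk1 : 1 ≤ pvCnt cs := pvCnt_pos cs v (hlen ▸ hvn') hm1
            have hf0 : ¬ f = 0 := by omega
            have hx : (1 - cs.getD u 0 : Int) ≠ -1 := by
              rcases hcu with h | h <;> rw [h] <;> norm_num
            have hc1 : (1 - cs.getD u 0 : Int) = 0 ∨ (1 - cs.getD u 0 : Int) = 1 := by
              rcases hcu with h | h <;> rw [h] <;> norm_num
            have huv : u ≠ v := by
              intro hEq; rcases hcu with h' | h' <;> rw [hEq, hm1] at h' <;> cases h'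
            have hlen1 : (cs.set v (1 - cs.getD u 0)).length = n := by
              rw [List.length_set]; exact hlen
            have hcnt1 : pvCnt (cs.set v (1 - cs.getD u 0)) + 1 = pvCnt cs :=
              pvCnt_set cs v (1 - cs.getD u 0) (hlen ▸ hvn') hm1 hx
            have hvals1 : pvVals (cs.set v (1 - cs.getD u 0)) :=
              pvVals_set cs v (1 - cs.getD u 0) hvals hc1
            have hgu1 : (cs.set v (1 - cs.getD u 0)).getD u 0 = cs.getD u 0 :=
              pvGetD_set_ne cs v u _ huv
            have hgv1 : (cs.set v (1 - cs.getD u 0)).getD v 0 = 1 - cs.getD u 0 :=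
              pvGetD_set_self cs v _ (hlen ▸ hvn')
            have hmono1 : ∀ j, cs.getD j 0 ≠ -1 →
                (cs.set v (1 - cs.getD u 0)).getD j 0 = cs.getD j 0 := by
              intro j hj
              exact pvGetD_set_ne cs v j _ (fun hjv => hj (hjv ▸ hm1))
            have hklt : k - 1 < k := by omega
            rw [if_pos he, if_pos he, if_pos hneg, if_neg hcf, if_pos hm1, if_neg hf0,
              if_neg hf0]
            have hsinv3 : pvSinvB n (cs.set v (1 - cs.getD u 0))
                ((v, 0) :: (u, v + 1) :: rest) := by
              intro fr hfr
              rcases List.mem_cons.mp hfr with h | h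
              · subst h; exact ⟨Nat.zero_le n, by rw [hgv1]; exact hc1⟩
              · rcases List.mem_cons.mp h with h' | h'
                · subst h'; exact ⟨by omega, by rw [hgu1]; exact hcu⟩
                · obtain ⟨h1, h2⟩ := hsinv' fr h'
                  refine ⟨h1, ?_⟩
                  rw [hmono1 fr.1 (by rcases h2 with h3 | h3 <;> rw [h3] <;> norm_num)]
                  exact h2
            obtain ⟨hsimP, hirrP, hresP⟩ := ihk (k - 1) hklt
              (((v, 0) :: (u, v + 1) :: rest).foldr (fun fr x => (n - fr.2) + 1 + x) 0)
              g n ((v, 0) :: (u, v + 1) :: rest) (cs.set v (1 - cs.getD u 0))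
              (le_refl _) hlen1 hsinv3 hvals1 (by omega)
            rw [hsimP (f - 1) (by omega) v 0 ((u, v + 1) :: rest) rfl, hgv1, hrn]
            cases hres : pvLoopA g n (f - 1) (cs.set v (1 - cs.getD u 0)) v
                (1 - cs.getD u 0) (List.range n) with
            | none => simp only []
            | some cs2 =>
              obtain ⟨-, res_in⟩ := pvLoopA_props (k - 1) (List.range n) g n
                (cs.set v (1 - cs.getD u 0)) v (1 - cs.getD u 0) (f - 1) hlen1
                (fun w hw => List.mem_range.mp hw) hc1 hvals1 (by omega) (by omega)
              obtain ⟨hlen2, hcnt2, hvals2, hmono2⟩ := res_in cs2 hres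
              have hgu2 : cs2.getD u 0 = cs.getD u 0 := by
                rw [hmono2 u (by rw [hgu1]; rcases hcu with h | h <;> rw [h] <;> norm_num),
                  hgu1]
              have hsinvQ : pvSinvB n cs2 ((u, v + 1) :: rest) := by
                intro fr hfr
                rcases List.mem_cons.mp hfr with h | h
                · subst h; exact ⟨by omega, by rw [hgu2]; exact hcu⟩
                · obtain ⟨h1, h2⟩ := hsinv' fr h
                  have h2' : (cs.set v (1 - cs.getD u 0)).getD fr.1 0 = cs.getD fr.1 0 :=
                    hmono1 fr.1 (by rcases h2 with h3 | h3 <;> rw [h3] <;> norm_num)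
                  refine ⟨h1, ?_⟩
                  rw [hmono2 fr.1 (by rw [h2']; rcases h2 with h3 | h3 <;> rw [h3] <;> norm_num),
                    h2']
                  exact h2
              obtain ⟨hsimQ, -, -⟩ := ihk (k - 1) hklt
                (((u, v + 1) :: rest).foldr (fun fr x => (n - fr.2) + 1 + x) 0)
                g n ((u, v + 1) :: rest) cs2 (le_refl _) hlen2 hsinvQ hvals2 (by omega)
              simp only []
              rw [hsimQ (f - 1) (by omega) u (v + 1) rest rfl, hgu2, hnv2]
              obtain ⟨irr_co, res_co⟩ := pvLoopA_props (k - 1)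
                (List.range' (v + 1) (n - v - 1)) g n cs2 u (cs.getD u 0) (f - 1) hlen2
                (fun w hw => by have := (List.mem_range'_1.mp hw).2; omega) hcu hvals2
                (by omega) (by omega)
              rw [← irr_co f (by omega)]
              cases hres2 : pvLoopA g n (f - 1) cs2 u (cs.getD u 0)
                  (List.range' (v + 1) (n - v - 1)) with
              | none => simp only []
              | some cs3 =>
                simp only []
                obtain ⟨hlen3, hcnt3, hvals3, hmono3⟩ := res_co cs3 hres2
                have hsinvR : pvSinvB n cs3 rest := by
                  intro fr hfr
                  obtain ⟨h1, h2⟩ := hsinvQ fr (List.mem_cons_of_mem _ hfr)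
                  refine ⟨h1, ?_⟩
                  rw [hmono3 fr.1 (by rcases h2 with h3 | h3 <;> rw [h3] <;> norm_num)]
                  exact h2
                obtain ⟨-, hirrR, -⟩ := ihk (k - 1) hklt
                  (rest.foldr (fun fr x => (n - fr.2) + 1 + x) 0) g n rest cs3
                  (le_refl _) hlen3 hsinvR hvals3 (by omega)
                exact hirrR (f - 1) f (by omega) (by omega)
          · -- neighbour already has the other colour: skip
            have hnneg : ¬ cs.getD v 0 < 0 := by
              rcases pvVals_getD cs v hvals with h | h | h
              · exact absurd h hm1
              · rw [h]; norm_num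
              · rw [h]; norm_num
            rw [if_pos he, if_pos he, if_neg hcf, if_neg hcf, if_neg hm1, if_neg hnneg]
            obtain ⟨hsim', -, -⟩ := ihm (m - 1) (by omega) g n ((u, v + 1) :: rest) cs
              hm2 hlen hsinv2 hvals hcnt
            rw [hsim' f hkf u (v + 1) rest rfl, hnv2]
      · -- no edge: skip
        rw [if_neg he, if_neg he]
        obtain ⟨hsim', -, -⟩ := ihm (m - 1) (by omega) g n ((u, v + 1) :: rest) cs
          hm2 hlen hsinv2 hvals hcnt
        rw [hsim' f hkf u (v + 1) rest rfl, hnv2]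
    · -- the frame is exhausted: B pops, A's remaining neighbour list is empty
      have hnv : n - v = 0 := by omega
      rw [pvStepB_cons, if_neg hvn', hnv, List.range'_zero, pvLoopA_nil]
  refine ⟨hsim, ?_, ?_⟩
  · -- fuel-irrelevance
    intro f f' hkf hkf'
    cases st with
    | nil => rw [pvStepB_nil, pvStepB_nil]
    | cons fr rest =>
      obtain ⟨u, v⟩ := fr
      obtain ⟨hvle, hcu⟩ := hsinv (u, v) List.mem_cons_self
      have hsinv' : pvSinvB n cs rest := fun fr hfr => hsinv fr (List.mem_cons_of_mem _ hfr)
      rw [hfcons u v rest] at hm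
      rw [hsim f hkf u v rest rfl, hsim f' hkf' u v rest rfl]
      obtain ⟨irr, res⟩ := pvLoopA_props k (List.range' v (n - v)) g n cs u (cs.getD u 0)
        f hlen (fun w hw => by have := (List.mem_range'_1.mp hw).2; omega) hcu hvals hcnt hkf
      rw [irr f' hkf']
      cases hres : pvLoopA g n f' cs u (cs.getD u 0) (List.range' v (n - v)) with
      | none => simp only []
      | some cs' =>
        simp only []
        obtain ⟨hlen', hcnt', hvals', hmono'⟩ := res cs' (by rw [irr f' hkf']; exact hres)
        have hsinvR : pvSinvB n cs' rest := by
          intro fr hfr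
          obtain ⟨h1, h2⟩ := hsinv' fr hfr
          refine ⟨h1, ?_⟩
          rw [hmono' fr.1 (by rcases h2 with h3 | h3 <;> rw [h3] <;> norm_num)]
          exact h2
        obtain ⟨-, hirrR, -⟩ := ihm (m - 1) (by omega) g n rest cs'
          (by omega) hlen' hsinvR hvals' (by omega)
        exact hirrR f f' hkf hkf'
  · -- result facts
    intro f cs' hkf h
    cases st with
    | nil =>
      rw [pvStepB_nil] at h
      cases h; exact ⟨hlen, le_refl _, hvals, fun j _ => rfl⟩
    | cons fr rest =>
      obtain ⟨u, v⟩ := fr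
      obtain ⟨hvle, hcu⟩ := hsinv (u, v) List.mem_cons_self
      have hsinv' : pvSinvB n cs rest := fun fr hfr => hsinv fr (List.mem_cons_of_mem _ hfr)
      rw [hfcons u v rest] at hm
      rw [hsim f hkf u v rest rfl] at h
      obtain ⟨irr, res⟩ := pvLoopA_props k (List.range' v (n - v)) g n cs u (cs.getD u 0)
        f hlen (fun w hw => by have := (List.mem_range'_1.mp hw).2; omega) hcu hvals hcnt hkf
      cases hres : pvLoopA g n f cs u (cs.getD u 0) (List.range' v (n - v)) with
      | none => rw [hres] at h; cases h
      | some cs2 =>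
        rw [hres] at h
        obtain ⟨hlen2, hcnt2, hvals2, hmono2⟩ := res cs2 hres
        have hsinvR : pvSinvB n cs2 rest := by
          intro fr hfr
          obtain ⟨h1, h2⟩ := hsinv' fr hfr
          refine ⟨h1, ?_⟩
          rw [hmono2 fr.1 (by rcases h2 with h3 | h3 <;> rw [h3] <;> norm_num)]
          exact h2
        obtain ⟨-, -, hresR⟩ := ihm (m - 1) (by omega) g n rest cs2
          (by omega) hlen2 hsinvR hvals2 (by omega)
        obtain ⟨hl, hc', hvl, hmn⟩ := hresR f cs' hkf h
        refine ⟨hl, by omega, hvl, ?_⟩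
        intro j hj
        rw [hmn j (by rw [hmono2 j hj]; exact hj), hmono2 j hj]

-- the two outer loops agree (A over the index list, B over a counter)
theorem pvOuter_eq : ∀ (d i : Nat) (g : List (List Int)) (n : Nat) (cs : List Int),
    n - i ≤ d → cs.length = n → pvVals cs →
    pvOuterA g n cs (List.range' i (n - i)) = pvSweepB g n cs i := by
  intro d
  induction d with
  | zero =>
    intro i g n cs hd hlen hvals
    have h0 : n - i = 0 := by omega
    rw [h0, List.range'_zero, pvSweepB]
    rw [dif_neg (by omega : ¬ i < n)]
    rfl
  | succ d ih =>
    intro i g n cs hd hlen hvals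
    by_cases hin : i < n
    · have h1 : n - i = (n - (i + 1)) + 1 := by omega
      rw [h1, List.range'_succ, pvSweepB, dif_pos hin]
      show pvOuterA g n cs (i :: List.range' (i + 1) (n - (i + 1))) = _
      rw [pvOuterA]
      by_cases hi : cs.getD i 0 = -1
      · have hneg : cs.getD i 0 < 0 := by rw [hi]; norm_num
        rw [if_pos hi, if_pos hneg]
        have hlen1 : (cs.set i 0).length = n := by rw [List.length_set]; exact hlen
        have hvals1 : pvVals (cs.set i 0) := pvVals_set cs i 0 hvals (Or.inl rfl)
        have hsinv1 : pvSinvB n (cs.set i 0) [(i, 0)] := by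
          intro fr hfr
          rcases List.mem_cons.mp hfr with h | h
          · subst h
            exact ⟨Nat.zero_le n, Or.inl (pvGetD_set_self cs i 0 (hlen ▸ hin))⟩
          · cases h
        have hcnt1 : pvCnt (cs.set i 0) ≤ n := le_trans (pvCnt_le _) (le_of_eq hlen1)
        obtain ⟨hsimP, -, hresP⟩ := pvStepB_props (pvCnt (cs.set i 0))
          ([((i : Nat), (0 : Nat))].foldr (fun fr x => (n - fr.2) + 1 + x) 0)
          g n [(i, 0)] (cs.set i 0) (le_refl _) hlen1 hsinv1 hvals1 (le_refl _)
        have hrun := hsimP n hcnt1 i 0 [] rfl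
        rw [pvGetD_set_self cs i 0 (hlen ▸ hin), Nat.sub_zero,
          ← List.range_eq_range'] at hrun
        rw [hrun]
        obtain ⟨-, res⟩ := pvLoopA_props (pvCnt (cs.set i 0)) (List.range n) g n
          (cs.set i 0) i 0 n hlen1 (fun w hw => List.mem_range.mp hw) (Or.inl rfl)
          hvals1 (le_refl _) hcnt1
        cases hres : pvLoopA g n n (cs.set i 0) i 0 (List.range n) with
        | none => rfl
        | some cs' =>
          simp only [pvStepB_nil]
          obtain ⟨hlen', -, hvals', -⟩ := res cs' hres
          exact ih (i + 1) g n cs' (by omega) hlen' hvals'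
      · have hnneg : ¬ cs.getD i 0 < 0 := by
          rcases pvVals_getD cs i hvals with h | h | h
          · exact absurd h hi
          · rw [h]; norm_num
          · rw [h]; norm_num
        rw [if_neg hi, if_neg hnneg]
        exact ih (i + 1) g n cs (by omega) hlen hvals
    · have h0 : n - i = 0 := by omega
      rw [h0, List.range'_zero, pvSweepB, dif_neg hin]
      rfl

-- ===== VERDICT (by name: the statement is the Claim_ definition above) =====
theorem deux_col_spec : Claim_equal_deux_col := by
  intro g _ _
  unfold Spec_deux_col deux_col deux_col_alt
  have h := pvOuter_eq g.length 0 g g.length (List.replicate g.length (-1)) (by omega)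
    (List.length_replicate) (by intro x hx; exact Or.inl (List.eq_of_mem_replicate hx))
  rw [Nat.sub_zero, ← List.range_eq_range'] at h
  exact h
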